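-- pv_equiv track=rewrite | github.com/Curly-Mo/codejam | 2013/good-luck/good-luck.py | makeGuess
-- ===== SOURCE A (Python) =====
-- import itertools
-- import functools
--
-- def makeGuess(facts, product, n):
-- 	guess=""
-- 	multipleFacts=[]
-- 	for x in range(0,n):
-- 		multipleFacts.append(facts)
-- 	permutations = list(itertools.product(*multipleFacts))
-- 	for permute in permutations:
-- 		if functools.reduce(lambda x, y: x*y, permute) == product:
-- 			for num in permute:
-- 				guess+=str(num)
-- 			return guess
-- 	return guess
-- ===== SOURCE B (Python) =====
-- def makeGuess(facts, product, n):
--     # DFS in the same lexicographic order as A's full enumeration,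
--     # pruning branches whose partial product can no longer reach `product`.
--     def dfs(k, p):
--         if k == 0:
--             return [] if p == product else None
--         for x in facts:
--             q = p * x
--             if q == 0:
--                 if product != 0:
--                     continue
--             elif product % q != 0:
--                 continue
--             rest = dfs(k - 1, q)
--             if rest is not None:
--                 return [x] + rest
--         return None
--     path = dfs(n, 1)
--     guess = ""
--     if path is not None:
--         for num in path:
--             guess += str(num)
--     return guess
-- ===== Notes on version B (the rewrite author's own statement) =====
-- stated objective: faster
-- what changed: Replaced A's materialisation and linear scan of all |facts|^n cartesian tuples with a depth-first search in the same lexicographic order that tracks the partial product and prunes any branch whose partial product is zero (unless the target is zero) or does not divide the target.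
-- outside the precondition, e.g. on makeGuess([2, 3], 6, 0): A raises TypeError, B returns ''
import Mathlib
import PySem

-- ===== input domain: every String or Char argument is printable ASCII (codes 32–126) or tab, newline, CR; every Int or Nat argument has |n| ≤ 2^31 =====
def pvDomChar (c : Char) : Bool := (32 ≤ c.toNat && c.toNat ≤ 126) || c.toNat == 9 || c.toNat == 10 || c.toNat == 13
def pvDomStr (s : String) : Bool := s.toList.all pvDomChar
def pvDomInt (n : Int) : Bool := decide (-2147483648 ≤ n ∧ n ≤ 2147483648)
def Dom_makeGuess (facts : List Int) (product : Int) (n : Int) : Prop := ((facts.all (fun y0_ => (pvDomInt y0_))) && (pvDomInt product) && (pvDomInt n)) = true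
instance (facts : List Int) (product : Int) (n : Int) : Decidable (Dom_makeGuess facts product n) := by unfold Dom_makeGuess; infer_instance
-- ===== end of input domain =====

-- B replaces A's full enumeration of all |facts|^n tuples by a DFS in the same
-- lexicographic order that prunes branches whose partial product cannot reach `product`.

-- ===== PORT A =====

-- `functools.reduce(mul, t)`: exact for nonempty t; Python raises TypeError on [],
-- which Pre_makeGuess excludes (n ≥ 1 makes every generated tuple nonempty).
def pyReduceMul : List Int → Int
  | [] => 0
  | h :: t => t.foldl (· * ·) h

-- the `for num in permute: guess += str(num)` loop (shared literally by both Pythons)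
def strCat (t : List Int) : String := t.foldl (fun g x => g ++ PySem.Int.toStr x) ""

-- `list(itertools.product(*([facts]*n)))`: first coordinate varies slowest (exact)
def tuplesA (facts : List Int) : Nat → List (List Int)
  | 0 => [[]]
  | k+1 => facts.flatMap (fun x => (tuplesA facts k).map (x :: ·))

-- the `for permute in permutations:` loop with its early return
def aLoop (product : Int) : List (List Int) → String
  | [] => ""
  | t :: ts => if pyReduceMul t = product then strCat t else aLoop product ts

def makeGuess (facts : List Int) (product : Int) (n : Int) : String :=
  aLoop product (tuplesA facts n.toNat)

-- ===== PORT B =====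

-- Source B's recursive dfs: the `for x in facts` loop with early return is findSome?;
-- `product % q != 0` is PySem.Int.mod (exact Python %)
def dfsB (facts : List Int) (product : Int) : Nat → Int → Option (List Int)
  | 0, p => if p = product then some [] else none
  | k+1, p =>
    facts.findSome? (fun x =>
      -- q := p * x inlined
      if (p * x = 0 ∧ product ≠ 0) ∨ (p * x ≠ 0 ∧ PySem.Int.mod product (p * x) ≠ 0) then none
      else (dfsB facts product k (p * x)).map (x :: ·))

def makeGuess_alt (facts : List Int) (product : Int) (n : Int) : String :=
  match dfsB facts product n.toNat 1 with
  | some l => strCat l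
  | none => ""

-- ===== PRECONDITION & SPEC =====
-- A raises TypeError (reduce of an empty tuple) whenever n ≤ 0; Pre_ excludes exactly that.
def Pre_makeGuess (facts : List Int) (product : Int) (n : Int) : Prop := 1 ≤ n
instance (facts : List Int) (product : Int) (n : Int) : Decidable (Pre_makeGuess facts product n) := by unfold Pre_makeGuess; infer_instance
def pvWitness_makeGuess : List Int × Int × Int := ([2, 3], 6, 2)

def Spec_makeGuess (facts : List Int) (product : Int) (n : Int) (out : String) : Prop := out = makeGuess_alt facts product n
instance (facts : List Int) (product : Int) (n : Int) (out : String) : Decidable (Spec_makeGuess facts product n out) := by unfold Spec_makeGuess; infer_instance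

-- ===== CLAIM (what is proved, stated in full; the proofs are below) =====
def Claim_equal_makeGuess : Prop := ∀ (facts : List Int) (product : Int) (n : Int), Dom_makeGuess facts product n → Pre_makeGuess facts product n → Spec_makeGuess facts product n (makeGuess facts product n)

-- ===== LEMMAS AND PROOFS =====

def listProd (t : List Int) : Int := t.foldl (· * ·) 1

theorem foldl_mul_eq (t : List Int) : ∀ a : Int, t.foldl (· * ·) a = a * listProd t := by
  induction t with
  | nil => intro a; simp [listProd]
  | cons h r ih =>
      intro a
      have h2 : listProd (h :: r) = (1 * h) * listProd r := by
        simp only [listProd, List.foldl_cons]; exact ih (1 * h)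
      simp only [List.foldl_cons, ih (a * h), h2]; ring

theorem pyReduceMul_eq (h : Int) (r : List Int) : pyReduceMul (h :: r) = listProd (h :: r) := by
  simp [pyReduceMul, listProd, List.foldl_cons, foldl_mul_eq r h, one_mul]

theorem mem_tuplesA_length (facts : List Int) (k : Nat) (t : List Int)
    (h : t ∈ tuplesA facts k) : t.length = k := by
  induction k generalizing t with
  | zero => simp [tuplesA] at h; simp [h]
  | succ m ih =>
      simp only [tuplesA, List.mem_flatMap, List.mem_map] at h
      obtain ⟨x, _, r, hr, rfl⟩ := h
      simp [ih r hr]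

theorem find?_flatMap {α β : Type} (l : List α) (g : α → List β) (pred : β → Bool) :
    (l.flatMap g).find? pred = l.findSome? (fun x => (g x).find? pred) := by
  induction l with
  | nil => simp
  | cons h r ih =>
      simp only [List.flatMap_cons, List.find?_append, List.findSome?_cons]
      cases (g h).find? pred with
      | none => simp [ih]
      | some b => simp

theorem findSome?_congr_mem {α β : Type} (l : List α) (f g : α → Option β)
    (h : ∀ x ∈ l, f x = g x) : l.findSome? f = l.findSome? g := by
  induction l with
  | nil => rfl
  | cons a r ih =>
      simp only [List.findSome?_cons, h a List.mem_cons_self]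
      cases g a with
      | none => exact ih (fun x hx => h x (List.mem_cons_of_mem a hx))
      | some b => rfl

theorem listProd_cons (x : Int) (t : List Int) : listProd (x :: t) = x * listProd t := by
  simp only [listProd, List.foldl_cons, one_mul, foldl_mul_eq t x]

-- dfsB with partial product p computes the first tuple t (in A's order) with p·∏t = product
theorem dfsB_eq_find (facts : List Int) (product : Int) (k : Nat) :
    ∀ p : Int, dfsB facts product k p
      = (tuplesA facts k).find? (fun t => decide (p * listProd t = product)) := by
  induction k with
  | zero =>
      intro p
      simp only [dfsB, tuplesA, List.find?_cons]
      by_cases h : p = product <;> simp [h, listProd]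
  | succ m ih =>
      intro p
      simp only [dfsB, tuplesA, find?_flatMap]
      apply findSome?_congr_mem
      intro x _
      by_cases hpr : (p * x = 0 ∧ product ≠ 0) ∨ (p * x ≠ 0 ∧ PySem.Int.mod product (p * x) ≠ 0)
      · rw [if_pos hpr]
        symm
        apply List.find?_eq_none.mpr
        intro t ht
        simp only [List.mem_map] at ht
        obtain ⟨r, _, rfl⟩ := ht
        simp only [decide_eq_true_eq]
        intro heq
        have hq : (p * x) * listProd r = product := by
          rw [listProd_cons] at heq; rw [mul_assoc]; exact heq
        rcases hpr with ⟨hz, hnz⟩ | ⟨hnz, hnd⟩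
        · rw [hz, zero_mul] at hq; exact hnz hq.symm
        · exact hnd ((PySem.Int.mod_eq_zero_iff_dvd product (p * x)).mpr ⟨listProd r, hq.symm⟩)
      · rw [if_neg hpr, ih (p * x), List.find?_map]
        have hfun : ((fun t => decide (p * listProd t = product)) ∘ (x :: ·))
            = (fun t : List Int => decide (p * x * listProd t = product)) := by
          funext t
          simp only [Function.comp, listProd_cons]
          rw [← mul_assoc]
        rw [hfun]

-- aLoop is find? followed by strCat
theorem aLoop_eq_find (product : Int) (ts : List (List Int)) :
    aLoop product ts = (match ts.find? (fun t => decide (pyReduceMul t = product)) with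
      | some t => strCat t | none => "") := by
  induction ts with
  | nil => simp [aLoop]
  | cons t r ih =>
      simp only [aLoop, List.find?_cons]
      by_cases h : pyReduceMul t = product <;> simp [h, ih]

theorem find?_congr_mem {α : Type} (l : List α) (p q : α → Bool)
    (h : ∀ x ∈ l, p x = q x) : l.find? p = l.find? q := by
  induction l with
  | nil => rfl
  | cons a r ih =>
      simp only [List.find?_cons, h a (List.mem_cons_self)]
      cases q a
      · exact ih (fun x hx => h x (List.mem_cons_of_mem a hx))
      · rfl

-- ===== VERDICT (by name: the statement is the Claim_ definition above) =====
theorem makeGuess_spec : Claim_equal_makeGuess := by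
  intro facts product n _ hpre
  unfold Spec_makeGuess makeGuess makeGuess_alt
  rw [dfsB_eq_find, aLoop_eq_find]
  have hn : 1 ≤ n.toNat := by unfold Pre_makeGuess at hpre; omega
  have : (tuplesA facts n.toNat).find? (fun t => decide (pyReduceMul t = product))
       = (tuplesA facts n.toNat).find? (fun t => decide (1 * listProd t = product)) := by
    apply find?_congr_mem
    intro t ht
    have hlen := mem_tuplesA_length facts n.toNat t ht
    cases t with
    | nil => simp at hlen; omega
    | cons h r => simp [pyReduceMul_eq, one_mul]
  rw [this]
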